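-- pv_equiv track=rewrite | github.com/hbot07/Competitive_Programming-Python | gauri10Sep.py | getNumPairs
-- ===== SOURCE A (Python) =====
-- def getNumPairs(arr, queries):
--     maxima = arr[0]
--     minima = arr[0]
--     pref_max = []
--     suf_min = []
--     for i in range(len(arr)):
--         if arr[i] > maxima:
--             maxima = arr[i]
--         pref_max.append(maxima)
--
--     for i in range(len(arr) - 1, -1, -1):
--         if arr[i] < minima:
--             minima = arr[i]
--         suf_min.append(minima)
--     suf_min.reverse()
--
--     answer = []
--     for q in queries:
--         counter = 0
--         for i in pref_max:
--             for j in suf_min: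
--                 if i * j == q:
--                     counter += 1
--         answer.append(counter)
--
--     return answer
-- ===== SOURCE B (Python) =====
-- def getNumPairs(arr, queries):
--     # Build pref_max / suf_min once, count every product pref_max[i]*suf_min[j]
--     # into a dict once, then answer each query with a single O(1) lookup.
--     m = arr[0]
--     pref_max = []
--     for x in arr:
--         m = max(m, x)
--         pref_max.append(m)
--     m = arr[0]
--     suf_min = []
--     for x in reversed(arr):
--         m = min(m, x)
--         suf_min.append(m)
--     suf_min.reverse()
--     products = [i * j for i in pref_max for j in suf_min]
--     counts = {}
--     for p in products:
--         counts[p] = counts.get(p, 0) + 1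
--     return [counts.get(q, 0) for q in queries]
-- ===== Notes on version B (the rewrite author's own statement) =====
-- stated objective: faster
-- what changed: Instead of re-scanning all pref_max x suf_min pairs for every query (A's triple loop), B counts every product into a dict once and answers each query by a single lookup.
import Mathlib
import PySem

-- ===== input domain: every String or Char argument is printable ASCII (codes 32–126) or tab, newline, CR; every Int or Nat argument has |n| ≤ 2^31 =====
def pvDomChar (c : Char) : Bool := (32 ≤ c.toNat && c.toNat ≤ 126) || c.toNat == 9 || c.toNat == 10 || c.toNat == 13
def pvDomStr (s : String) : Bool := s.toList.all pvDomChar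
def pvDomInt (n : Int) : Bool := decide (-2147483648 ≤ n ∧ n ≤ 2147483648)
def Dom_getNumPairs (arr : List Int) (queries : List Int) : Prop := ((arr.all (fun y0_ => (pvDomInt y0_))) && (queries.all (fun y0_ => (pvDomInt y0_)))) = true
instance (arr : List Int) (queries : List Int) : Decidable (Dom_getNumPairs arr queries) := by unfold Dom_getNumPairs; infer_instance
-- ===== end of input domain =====

-- B counts all pref_max×suf_min products into a dict once and answers each
-- query by a single lookup, replacing A's per-query rescan of all pairs.

-- ===== PORT A =====
def getNumPairs (arr : List Int) (queries : List Int) : List Int :=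
  match arr with
  | [] => []   -- unreachable under Pre_ (arr[0] raises IndexError in Python)
  | a0 :: _ =>
    let prefState := (PySem.List.pyRange 0 arr.length 1).foldl
      (fun (s : Int × List Int) i =>
        let x := PySem.List.pyGetD arr i 0
        let m := if x > s.1 then x else s.1
        (m, s.2 ++ [m])) (a0, [])
    let pref_max := prefState.2
    let sufState := (PySem.List.pyRange ((arr.length : Int) - 1) (-1) (-1)).foldl
      (fun (s : Int × List Int) i =>
        let x := PySem.List.pyGetD arr i 0
        let m := if x < s.1 then x else s.1
        (m, s.2 ++ [m])) (a0, [])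
    let suf_min := sufState.2.reverse
    queries.foldl (fun answer q =>
      answer ++ [pref_max.foldl (fun c i =>
        suf_min.foldl (fun c j => if i * j == q then c + 1 else c) c) 0]) []

-- ===== PORT B =====
def getNumPairs_alt (arr : List Int) (queries : List Int) : List Int :=
  match arr with
  | [] => []   -- unreachable under Pre_ (arr[0] raises IndexError in Python)
  | a0 :: _ =>
    let pref_max := (arr.foldl
      (fun (s : Int × List Int) x => let m := max s.1 x; (m, s.2 ++ [m])) (a0, [])).2
    let suf_min := ((arr.reverse.foldl
      (fun (s : Int × List Int) x => let m := min s.1 x; (m, s.2 ++ [m])) (a0, [])).2).reverse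
    let products := pref_max.flatMap (fun i => suf_min.map (fun j => i * j))
    let counts := products.foldl (fun d p => d.insert p (d.getD p 0 + 1))
      (PySem.Dict.empty : PySem.Dict Int Int)
    queries.map (fun q => counts.getD q 0)

-- ===== PRECONDITION & SPEC =====
-- A evaluates arr[0], which raises IndexError when arr is empty.
def Pre_getNumPairs (arr : List Int) (queries : List Int) : Prop := arr ≠ []
instance (arr : List Int) (queries : List Int) : Decidable (Pre_getNumPairs arr queries) := by
  unfold Pre_getNumPairs; infer_instance
def pvWitness_getNumPairs : List Int × List Int := ([2, -1, 3], [6, -3, 0])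

def Spec_getNumPairs (arr : List Int) (queries : List Int) (out : List Int) : Prop :=
  out = getNumPairs_alt arr queries
instance (arr : List Int) (queries : List Int) (out : List Int) : Decidable (Spec_getNumPairs arr queries out) := by
  unfold Spec_getNumPairs; infer_instance

-- ===== CLAIM (what is proved, stated in full; the proofs are below) =====
def Claim_equal_getNumPairs : Prop := ∀ (arr : List Int) (queries : List Int),
  Dom_getNumPairs arr queries → Pre_getNumPairs arr queries →
  Spec_getNumPairs arr queries (getNumPairs arr queries)

-- ===== LEMMAS AND PROOFS =====

-- A's prefix-maximum index loop equals B's direct fold with `max` over arr.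
lemma prefA_eq (arr : List Int) (init : Int × List Int) :
    (PySem.List.pyRange 0 (arr.length : Int) 1).foldl
      (fun (s : Int × List Int) i =>
        let x := PySem.List.pyGetD arr i 0
        let m := if x > s.1 then x else s.1
        (m, s.2 ++ [m])) init
    = arr.foldl (fun (s : Int × List Int) x => let m := max s.1 x; (m, s.2 ++ [m])) init := by
  have h := PySem.List.foldl_pyRange_zero_pyGetD' arr 0
    (fun (s : Int × List Int) (v : Int) =>
      let m := if v > s.1 then v else s.1; (m, s.2 ++ [m])) init
  refine h.trans ?_
  have hfg : (fun (s : Int × List Int) (v : Int) =>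
      let m := if v > s.1 then v else s.1; (m, s.2 ++ [m]))
      = (fun (s : Int × List Int) x => let m := max s.1 x; (m, s.2 ++ [m])) := by
    funext s v
    show ((if v > s.1 then v else s.1), s.2 ++ [if v > s.1 then v else s.1])
       = (max s.1 v, s.2 ++ [max s.1 v])
    rcases lt_trichotomy s.1 v with h | h | h <;> simp [h, le_of_lt, not_lt.mpr]
  rw [hfg]

-- A's backwards suffix-minimum index loop equals B's fold with `min` over arr.reverse.
lemma sufA_eq (arr : List Int) (init : Int × List Int) :
    (PySem.List.pyRange ((arr.length : Int) - 1) (-1) (-1)).foldl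
      (fun (s : Int × List Int) i =>
        let x := PySem.List.pyGetD arr i 0
        let m := if x < s.1 then x else s.1
        (m, s.2 ++ [m])) init
    = arr.reverse.foldl (fun (s : Int × List Int) x => let m := min s.1 x; (m, s.2 ++ [m])) init := by
  have hr : PySem.List.pyRange ((arr.length : Int) - 1) (-1) (-1)
      = (PySem.List.pyRange 0 (arr.length : Int) 1).reverse := by
    rw [PySem.List.pyRange_neg_one_eq_reverse]
    norm_num
  rw [hr]
  have hm := PySem.List.map_pyGetD_pyRange_zero' arr 0
  have hfg : (fun (s : Int × List Int) (v : Int) =>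
      let m := if v < s.1 then v else s.1; (m, s.2 ++ [m]))
      = (fun (s : Int × List Int) x => let m := min s.1 x; (m, s.2 ++ [m])) := by
    funext s v
    show ((if v < s.1 then v else s.1), s.2 ++ [if v < s.1 then v else s.1])
       = (min s.1 v, s.2 ++ [min s.1 v])
    rcases lt_trichotomy s.1 v with h | h | h <;> simp [h, le_of_lt, not_lt.mpr]
  calc (PySem.List.pyRange 0 (arr.length : Int) 1).reverse.foldl
        (fun (s : Int × List Int) i =>
          let x := PySem.List.pyGetD arr i 0
          let m := if x < s.1 then x else s.1
          (m, s.2 ++ [m])) init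
      = ((PySem.List.pyRange 0 (arr.length : Int) 1).reverse.map
          (fun j => PySem.List.pyGetD arr j 0)).foldl
          (fun (s : Int × List Int) (v : Int) =>
            let m := if v < s.1 then v else s.1; (m, s.2 ++ [m])) init := by
        rw [List.foldl_map]
    _ = arr.reverse.foldl
          (fun (s : Int × List Int) x => let m := min s.1 x; (m, s.2 ++ [m])) init := by
        rw [List.map_reverse, hm, hfg]

-- A's per-query double counting loop counts q among all products pref_max[i]*suf_min[j].
lemma countA_eq (pm sm : List Int) (q : Int) :
    pm.foldl (fun c i =>
      sm.foldl (fun c j => if i * j == q then c + 1 else c) c) 0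
    = ((pm.flatMap (fun i => sm.map (fun j => i * j))).count q : Int) := by
  have hstep : (fun (c i : Int) =>
      sm.foldl (fun c j => if i * j == q then c + 1 else c) c)
      = fun c i => c + (sm.countP (fun j => i * j == q) : Int) := by
    funext c i
    exact PySem.List.foldl_count_if (fun j => i * j == q) sm c
  rw [hstep, PySem.List.foldl_add, List.count_flatMap]
  push_cast
  rw [List.map_map, zero_add]
  have hc : (Nat.cast ∘ List.count q ∘ fun i : Int => List.map (fun j => i * j) sm)
      = fun i : Int => ((sm.countP (fun j => i * j == q) : Nat) : Int) := by
    funext i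
    simp [Function.comp, List.count_eq_countP, List.countP_map]
    rfl
  rw [hc]

-- ===== VERDICT (by name: the statement is the Claim_ definition above) =====
theorem getNumPairs_spec : Claim_equal_getNumPairs := by
  intro arr queries _hdom hpre
  unfold Spec_getNumPairs
  match arr with
  | [] => exact absurd rfl hpre
  | a0 :: t =>
    simp only [getNumPairs, getNumPairs_alt]
    rw [prefA_eq (a0 :: t) (a0, []), sufA_eq (a0 :: t) (a0, [])]
    rw [PySem.List.foldl_append_singleton_eq_map, List.nil_append]
    apply List.map_congr_left
    intro q _
    rw [countA_eq, PySem.Dict.getD_foldl_insert_add_one]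
    simp
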